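-- pv_equiv track=rewrite | github.com/shoark7/algorithm-with-python | problems_solving/algospot/pi.py | least_difficulty
-- ===== SOURCE A (Python) =====
-- INF = 987654321
--
-- def is_all_same(number):
--     n = number[0]
--     return all(n == x for x in number)
--
-- def is_monotonous(number, by=None):
--     if by is None:
--         by = int(number[1]) - int(number[0])
--
--     if len(number) == 1:
--         return True
--
--     for i in range(len(number)-1):
--         if int(number[i+1]) - int(number[i]) != by:
--             return False
--     return True
--
-- def is_one_by_one(number):
--     if len(number) == 1:
--         return True
--
--     length = len(number)
--     even = number[0]
--     odd = number[1]
--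
--     for i in range(length // 2):
--         if number[2*i] != even or number[2*i+1] != odd:
--             return False
--
--     if length % 2 == 1:
--         if number[length-1] != even:
--             return False
--
--     return True
--
-- def get_difficulty(number):
--     if is_all_same(number):
--         return 1
--     elif is_monotonous(number, 1):
--         return 2
--     elif is_one_by_one(number):
--         return 4
--     elif is_monotonous(number):
--         return 5
--     else:
--         return 10
--
-- def least_difficulty(N):
--     N = str(N).strip()
--     length = len(N)
--     cache = [-1 for _ in range(length)]
--
--     def calculate(begin):
--         ret = INF
--
--         if begin == length:
--             return 0
--         elif cache[begin] != -1:
--             return cache[begin]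
--
--         for l in range(3, 5+1):
--             if begin + l <= length:
--                 ret = min(ret, calculate(begin+l) + get_difficulty(N[begin:begin+l]))
--
--         cache[begin] = ret
--         return ret
--
--     return calculate(0)
-- ===== SOURCE B (Python) =====
-- INF = 987654321
--
-- def difficulty(chunk):
--     d = [ord(c) for c in chunk]
--     steps = [y - x for x, y in zip(d, d[1:])]
--     if all(t == 0 for t in steps):
--         return 1
--     if all(t == 1 for t in steps):
--         return 2
--     if all(v == d[i % 2] for i, v in enumerate(d)):
--         return 4
--     if len(set(steps)) == 1:
--         return 5
--     return 10
--
-- def least_difficulty(N):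
--     s = str(N).strip()
--     n = len(s)
--     dp = [0]
--     for begin in range(n - 1, -1, -1):
--         best = INF
--         for l in (3, 4, 5):
--             if begin + l <= n:
--                 best = min(best, dp[l - 1] + difficulty(s[begin:begin+l]))
--         dp = [best] + dp
--     return dp[0]
-- ===== Notes on version B (the rewrite author's own statement) =====
-- stated objective: alternative
-- what changed: Replaced the recursive memoized closure `calculate` plus the four character-predicate helpers by an iterative cons-building bottom-up DP over a single arithmetic classifier on ord-differences of the chunk.
-- outside the precondition, e.g. on least_difficulty(-10): A raises ValueError, B returns 10
import Mathlib
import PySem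

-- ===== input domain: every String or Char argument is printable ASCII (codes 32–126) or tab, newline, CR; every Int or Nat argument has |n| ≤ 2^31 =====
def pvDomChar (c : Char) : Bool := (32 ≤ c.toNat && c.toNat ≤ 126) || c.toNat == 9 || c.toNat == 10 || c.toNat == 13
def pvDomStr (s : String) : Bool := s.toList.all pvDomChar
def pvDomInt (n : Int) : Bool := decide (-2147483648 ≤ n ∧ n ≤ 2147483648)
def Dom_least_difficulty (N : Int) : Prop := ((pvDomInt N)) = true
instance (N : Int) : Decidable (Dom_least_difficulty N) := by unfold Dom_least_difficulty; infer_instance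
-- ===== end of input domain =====

-- B replaces A's recursive memoized `calculate` and its four character-predicate helpers by an
-- iterative cons-building DP over a single arithmetic classifier on ord-differences; objective:
-- alternative decomposition, same asymptotic cost.

-- ===== PORT A =====
def INF : Int := 987654321

-- int(number[i]) on a one-char string (always a digit inside Pre_)
def chInt (c : Char) : Int := (PySem.Int.ofStr? (String.ofList [c])).getD 0

def is_all_same (number : List Char) : Bool :=
  let n := number.getD 0 ' '   -- number[0]; number is nonempty at every call site
  number.all (fun x => n == x)

def is_monotonous (number : List Char) (byOpt : Option Int) : Bool :=
  let by_ := match byOpt with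
    | none => chInt (number.getD 1 ' ') - chInt (number.getD 0 ' ')
    | some b => b
  if number.length = 1 then true
  else (List.range (number.length - 1)).all (fun i =>
    chInt (number.getD (i+1) ' ') - chInt (number.getD i ' ') == by_)

def is_one_by_one (number : List Char) : Bool :=
  if number.length = 1 then true
  else
    let length := number.length
    let even := number.getD 0 ' '
    let odd := number.getD 1 ' '
    if (List.range (length / 2)).all (fun i =>
        number.getD (2*i) ' ' == even && number.getD (2*i+1) ' ' == odd) then
      (if length % 2 = 1 then number.getD (length - 1) ' ' == even else true)
    else false

def get_difficulty (number : List Char) : Int :=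
  if is_all_same number then 1
  else if is_monotonous number (some 1) then 2
  else if is_one_by_one number then 4
  else if is_monotonous number none then 5
  else 10

-- A's inner `calculate(begin)`: the memo cache is pure memoization, ported as plain recursion;
-- the loop `for l in range(3,6)` is unrolled; N[begin:begin+l] = (s.drop begin).take l for begin ≥ 0.
def calcA (s : List Char) (b : Nat) : Int :=
  if b = s.length then 0
  else
    let ret : Int := INF
    let ret := if _h3 : b + 3 ≤ s.length then
        min ret (calcA s (b+3) + get_difficulty ((s.drop b).take 3)) else ret
    let ret := if _h4 : b + 4 ≤ s.length then
        min ret (calcA s (b+4) + get_difficulty ((s.drop b).take 4)) else ret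
    let ret := if _h5 : b + 5 ≤ s.length then
        min ret (calcA s (b+5) + get_difficulty ((s.drop b).take 5)) else ret
    ret
termination_by s.length - b
decreasing_by all_goals omega

def least_difficulty (N : Int) : Int :=
  let s := (PySem.Str.strip (PySem.Int.toStr N)).toList
  calcA s 0

-- ===== PORT B =====
-- classifier of Source B: d = [ord(c) for c in chunk]; steps = consecutive differences
def difficultyB (chunk : List Char) : Int :=
  let d := chunk.map (fun c => (c.toNat : Int))
  let steps := (d.zip d.tail).map (fun p => p.2 - p.1)
  if steps.all (fun t => t == 0) then 1
  else if steps.all (fun t => t == 1) then 2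
  else if (PySem.List.enumerate d).all (fun iv => iv.2 == PySem.List.pyGetD d (PySem.Int.mod iv.1 2) 0) then 4
  else if steps.all (fun t => t == steps.getD 0 0) then 5
  else 10

-- one iteration of Source B's loop: prepend the value for position b to dp (dp = [best] + dp)
def stepB (s : List Char) (dp : List Int) (b : Nat) : List Int :=
  ([3, 4, 5].foldl (fun best l =>
    if b + l ≤ s.length then
      min best (dp.getD (l - 1) 0 + difficultyB ((s.drop b).take l))
    else best) INF) :: dp

def least_difficulty_alt (N : Int) : Int :=
  let s := (PySem.Str.strip (PySem.Int.toStr N)).toList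
  -- for begin in range(n-1, -1, -1): the indices n-1, …, 0
  (((List.range s.length).reverse.foldl (stepB s) [0]).getD 0 0)

-- ===== PRECONDITION & SPEC =====
-- Pre_ excludes N ≤ -10: there str(N) yields a chunk containing '-' and Python's int('-')
-- raises ValueError inside is_monotonous, so A raises (B's ord-based classifier returns there).
def Pre_least_difficulty (N : Int) : Prop := -9 ≤ N
instance (N : Int) : Decidable (Pre_least_difficulty N) := by unfold Pre_least_difficulty; infer_instance

def pvWitness_least_difficulty : Int := 12345

def Spec_least_difficulty (N : Int) (out : Int) : Prop := out = least_difficulty_alt N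
instance (N : Int) (out : Int) : Decidable (Spec_least_difficulty N out) := by unfold Spec_least_difficulty; infer_instance

-- ===== CLAIM (what is proved, stated in full; the proofs are below) =====
def Claim_equal_least_difficulty : Prop := ∀ (N : Int), Dom_least_difficulty N → Pre_least_difficulty N → Spec_least_difficulty N (least_difficulty N)

-- ===== LEMMAS AND PROOFS =====

lemma char_of_toNat {c d : Char} (h : c.toNat = d.toNat) : c = d :=
  Char.ext (UInt32.toNat_inj.mp h)

lemma char_eq_iff {c d : Char} : c = d ↔ (c.toNat : Int) = (d.toNat : Int) :=
  ⟨fun h => by rw [h], fun h => char_of_toNat (by exact_mod_cast h)⟩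

lemma chInt_digit (c : Char) (h : c.isDigit) : chInt c = (c.toNat : Int) - 48 := by
  have hb : 48 ≤ c.toNat ∧ c.toNat ≤ 57 := by
    simp [Char.isDigit, UInt32.le_iff_toNat_le] at h; exact h
  have h10 : c.toNat = 48 ∨ c.toNat = 49 ∨ c.toNat = 50 ∨ c.toNat = 51 ∨ c.toNat = 52 ∨
      c.toNat = 53 ∨ c.toNat = 54 ∨ c.toNat = 55 ∨ c.toNat = 56 ∨ c.toNat = 57 := by omega
  rcases h10 with h|h|h|h|h|h|h|h|h|h <;>
    first
      | (rw [char_of_toNat (d := '0') h]; decide)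
      | (rw [char_of_toNat (d := '1') h]; decide)
      | (rw [char_of_toNat (d := '2') h]; decide)
      | (rw [char_of_toNat (d := '3') h]; decide)
      | (rw [char_of_toNat (d := '4') h]; decide)
      | (rw [char_of_toNat (d := '5') h]; decide)
      | (rw [char_of_toNat (d := '6') h]; decide)
      | (rw [char_of_toNat (d := '7') h]; decide)
      | (rw [char_of_toNat (d := '8') h]; decide)
      | (rw [char_of_toNat (d := '9') h]; decide)

-- the two difficulty classifiers agree on digit chunks of lengths 3, 4, 5
set_option maxHeartbeats 2000000 in
lemma chunk3 (x y z : Char) (ex : chInt x = (x.toNat:Int) - 48) (ey : chInt y = (y.toNat:Int) - 48)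
    (ez : chInt z = (z.toNat:Int) - 48) :
    difficultyB [x, y, z] = get_difficulty [x, y, z] := by
  unfold difficultyB get_difficulty is_all_same is_monotonous is_one_by_one
  simp [List.range_succ, PySem.List.enumerate, PySem.List.pyGetD, PySem.Int.mod,
    PySem.List.pyGet?, PySem.List.pyIdx?, ex, ey, ez, char_eq_iff]
  split_ifs <;> omega

set_option maxHeartbeats 2000000 in
lemma chunk4 (x y z w : Char) (ex : chInt x = (x.toNat:Int) - 48) (ey : chInt y = (y.toNat:Int) - 48)
    (ez : chInt z = (z.toNat:Int) - 48) (ew : chInt w = (w.toNat:Int) - 48) :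
    difficultyB [x, y, z, w] = get_difficulty [x, y, z, w] := by
  unfold difficultyB get_difficulty is_all_same is_monotonous is_one_by_one
  simp [List.range_succ, PySem.List.enumerate, PySem.List.pyGetD, PySem.Int.mod,
    PySem.List.pyGet?, PySem.List.pyIdx?, ex, ey, ez, ew, char_eq_iff]
  split_ifs <;> omega

set_option maxHeartbeats 4000000 in
lemma chunk5 (x y z w v : Char) (ex : chInt x = (x.toNat:Int) - 48) (ey : chInt y = (y.toNat:Int) - 48)
    (ez : chInt z = (z.toNat:Int) - 48) (ew : chInt w = (w.toNat:Int) - 48)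
    (ev : chInt v = (v.toNat:Int) - 48) :
    difficultyB [x, y, z, w, v] = get_difficulty [x, y, z, w, v] := by
  unfold difficultyB get_difficulty is_all_same is_monotonous is_one_by_one
  simp [List.range_succ, PySem.List.enumerate, PySem.List.pyGetD, PySem.Int.mod,
    PySem.List.pyGet?, PySem.List.pyIdx?, ex, ey, ez, ew, ev, char_eq_iff]
  split_ifs <;> omega

lemma chunkEq (c : List Char) (hd : ∀ a ∈ c, a.isDigit)
    (h : c.length = 3 ∨ c.length = 4 ∨ c.length = 5) :
    difficultyB c = get_difficulty c := by
  match c, h with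
  | [x, y, z], _ =>
    exact chunk3 x y z (chInt_digit x (hd x (by simp))) (chInt_digit y (hd y (by simp)))
      (chInt_digit z (hd z (by simp)))
  | [x, y, z, w], _ =>
    exact chunk4 x y z w (chInt_digit x (hd x (by simp))) (chInt_digit y (hd y (by simp)))
      (chInt_digit z (hd z (by simp))) (chInt_digit w (hd w (by simp)))
  | [x, y, z, w, v], _ =>
    exact chunk5 x y z w v (chInt_digit x (hd x (by simp))) (chInt_digit y (hd y (by simp)))
      (chInt_digit z (hd z (by simp))) (chInt_digit w (hd w (by simp)))
      (chInt_digit v (hd v (by simp)))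

-- every character str(N) produces for N ≥ 0 is a decimal digit
lemma digitChar_isDigit (n : Nat) (h : n < 10) : (Nat.digitChar n).isDigit := by
  interval_cases n <;> decide

lemma toDigitsCore_digits : ∀ (f n : Nat) (acc : List Char), (∀ c ∈ acc, c.isDigit) →
    ∀ c ∈ Nat.toDigitsCore 10 f n acc, c.isDigit := by
  intro f
  induction f with
  | zero => intro n acc hacc c hc; rw [Nat.toDigitsCore] at hc; exact hacc c hc
  | succ f ih =>
    intro n acc hacc c hc
    rw [Nat.toDigitsCore] at hc
    have hstep : ∀ x ∈ (Nat.digitChar (n % 10) :: acc), x.isDigit := by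
      intro x hx
      rcases List.mem_cons.mp hx with h | h
      · subst h; exact digitChar_isDigit _ (Nat.mod_lt _ (by norm_num))
      · exact hacc x h
    by_cases hz : n / 10 = 0
    · simp only [hz, if_pos] at hc
      exact hstep c (by simpa using hc)
    · simp only [hz, if_neg, not_false_iff] at hc
      exact ih (n / 10) _ hstep c hc

lemma strip_digits (N : Int) (h : 0 ≤ N) :
    ∀ c ∈ (PySem.Str.strip (PySem.Int.toStr N)).toList, c.isDigit := by
  intro c hc
  have h1 : (PySem.Str.strip (PySem.Int.toStr N)).toList
      = PySem.Chars.strip (PySem.Int.toStr N).toList := by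
    simp [PySem.Str.strip]
  rw [h1] at hc
  have h2 : c ∈ (PySem.Int.toStr N).toList := by
    unfold PySem.Chars.strip PySem.Chars.rstrip PySem.Chars.lstrip at hc
    rw [List.mem_reverse] at hc
    have s1 := (List.dropWhile_sublist (p := PySem.Chars.isspace)
      (l := (List.dropWhile PySem.Chars.isspace (PySem.Int.toStr N).toList).reverse)).mem hc
    rw [List.mem_reverse] at s1
    exact (List.dropWhile_sublist (p := PySem.Chars.isspace)).mem s1
  rw [PySem.Int.toList_toStr] at h2
  unfold PySem.Int.toChars at h2
  rw [if_neg (by omega)] at h2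
  exact toDigitsCore_digits _ _ _ (by simp) c h2

-- the DP table of B: the values calcA s b, …, calcA s n
def Gmap (s : List Char) (b : Nat) : List Int :=
  (List.range' b (s.length - b + 1)).map (calcA s)

lemma calcA_base (s : List Char) : calcA s s.length = 0 := by
  rw [calcA]; simp

lemma Gmap_last (s : List Char) : Gmap s s.length = [0] := by
  unfold Gmap
  rw [Nat.sub_self]
  simp [calcA_base]

lemma Gmap_cons (s : List Char) (b : Nat) (h : b < s.length) :
    Gmap s b = calcA s b :: Gmap s (b + 1) := by
  unfold Gmap
  rw [show s.length - b + 1 = (s.length - (b + 1) + 1) + 1 by omega, List.range'_succ]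
  simp

lemma Gmap_getD (s : List Char) (b l : Nat) (h1 : 1 ≤ l) (h2 : b + l ≤ s.length) :
    (Gmap s (b + 1)).getD (l - 1) 0 = calcA s (b + l) := by
  unfold Gmap
  have hlt : l - 1 < (List.range' (b + 1) (s.length - (b + 1) + 1)).length := by
    simp; omega
  rw [List.getD_eq_getElem _ _ (by simpa using hlt)]
  simp only [List.getElem_map, List.getElem_range']
  congr 1
  omega

lemma stepB_Gmap (s : List Char) (hd : ∀ a ∈ s, a.isDigit) (b : Nat) (hb : b < s.length) :
    stepB s (Gmap s (b + 1)) b = Gmap s b := by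
  have hchunk : ∀ l : Nat, b + l ≤ s.length →
      ((s.drop b).take l).length = l := by
    intro l hl
    simp [List.length_take, List.length_drop]; omega
  have hdig : ∀ l : Nat, ∀ a ∈ (s.drop b).take l, a.isDigit := fun l a ha =>
    hd a (List.mem_of_mem_drop (List.mem_of_mem_take ha))
  rw [Gmap_cons s b hb]
  unfold stepB
  congr 1
  rw [calcA, if_neg (by omega)]
  simp only [List.foldl]
  by_cases h3 : b + 3 ≤ s.length <;> by_cases h4 : b + 4 ≤ s.length <;>
    by_cases h5 : b + 5 ≤ s.length <;>
    simp only [h3, h4, h5, dif_pos, dif_neg, if_pos, if_neg, not_false_iff] <;>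
    (try rw [Gmap_getD s b 3 (by omega) h3]) <;>
    (try rw [Gmap_getD s b 4 (by omega) h4]) <;>
    (try rw [Gmap_getD s b 5 (by omega) h5]) <;>
    (try rw [chunkEq _ (hdig 3) (Or.inl (hchunk 3 h3))]) <;>
    (try rw [chunkEq _ (hdig 4) (Or.inr (Or.inl (hchunk 4 h4)))]) <;>
    (try rw [chunkEq _ (hdig 5) (Or.inr (Or.inr (hchunk 5 h5)))])

lemma fold_down (s : List Char) (hd : ∀ a ∈ s, a.isDigit) :
    ∀ b, b ≤ s.length → (List.range b).reverse.foldl (stepB s) (Gmap s b) = Gmap s 0 := by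
  intro b
  induction b with
  | zero => intro _; rfl
  | succ b ih =>
    intro hb
    rw [List.range_succ, List.reverse_append]
    simp only [List.reverse_singleton, List.singleton_append, List.foldl_cons]
    rw [stepB_Gmap s hd b (by omega)]
    exact ih (by omega)

lemma fold_eq (s : List Char) (hd : ∀ a ∈ s, a.isDigit) :
    ((List.range s.length).reverse.foldl (stepB s) [0]).getD 0 0 = calcA s 0 := by
  rw [show ([0] : List Int) = Gmap s s.length from (Gmap_last s).symm,
    fold_down s hd _ le_rfl]
  unfold Gmap
  rw [show s.length - 0 + 1 = s.length + 1 by omega, List.range'_succ]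
  simp

lemma alt_eq_of_digits (N : Int) (hd : ∀ c ∈ (PySem.Str.strip (PySem.Int.toStr N)).toList, c.isDigit) :
    least_difficulty_alt N = least_difficulty N := by
  unfold least_difficulty_alt least_difficulty
  exact fold_eq _ hd

-- string N between -9 and -1: str(N) has two characters, both programs return INF
lemma both_INF (s : List Char) (h : s.length = 2) :
    calcA s 0 = ((List.range s.length).reverse.foldl (stepB s) [0]).getD 0 0 := by
  rw [calcA, if_neg (by omega)]
  simp [stepB, h, List.range_succ]

lemma eq_of_len2 (N : Int) (h : (PySem.Str.strip (PySem.Int.toStr N)).toList.length = 2) :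
    least_difficulty N = least_difficulty_alt N := by
  unfold least_difficulty least_difficulty_alt
  exact both_INF _ h

-- ===== VERDICT (by name: the statement is the Claim_ definition above) =====
theorem least_difficulty_spec : Claim_equal_least_difficulty := by
  intro N _ hPre
  unfold Spec_least_difficulty
  by_cases h0 : 0 ≤ N
  · exact (alt_eq_of_digits N (strip_digits N h0)).symm
  · have hb : -9 ≤ N ∧ N ≤ -1 := ⟨hPre, by omega⟩
    have h2 : (PySem.Str.strip (PySem.Int.toStr N)).toList.length = 2 := by
      obtain ⟨hl, hr⟩ := hb
      interval_cases N <;> decide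
    exact eq_of_len2 N h2
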